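-- pv_equiv track=rewrite | github.com/ZhuoHanWang/mmpose_task3 | mmpose/mmpose/utils/cobb.py | exist_single_curve
-- ===== SOURCE A (Python) =====
-- def exist_single_curve(i, j, tan):
--     is_increasing = all(tan[k] <= tan[k + 1] for k in range(i, j))  # 检查从 i 到 j 是否递增
--     if is_increasing:
--         return True
--
--     is_decreasing = all(tan[k] >= tan[k + 1] for k in range(i, j))  # 检查从 i 到 j 是否递减
--     if is_decreasing:
--         return True
--
--     return False
-- ===== SOURCE B (Python) =====
-- def exist_single_curve(i, j, tan):
--     inc = dec = True
--     for k in range(i, j):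
--         if tan[k] > tan[k + 1]:
--             inc = False
--         if tan[k] < tan[k + 1]:
--             dec = False
--         if not (inc or dec):
--             break
--     return inc or dec
-- ===== Notes on version B (the rewrite author's own statement) =====
-- stated objective: alternative
-- what changed: B replaces A's two sequential short-circuit scans (all increasing, then all decreasing) by a single pass that maintains both monotonicity flags at once and breaks early when both are cleared.
-- outside the precondition, e.g. on exist_single_curve(0, 5, [1, 0, 1]): A returns False, B returns False
import Mathlib
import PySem

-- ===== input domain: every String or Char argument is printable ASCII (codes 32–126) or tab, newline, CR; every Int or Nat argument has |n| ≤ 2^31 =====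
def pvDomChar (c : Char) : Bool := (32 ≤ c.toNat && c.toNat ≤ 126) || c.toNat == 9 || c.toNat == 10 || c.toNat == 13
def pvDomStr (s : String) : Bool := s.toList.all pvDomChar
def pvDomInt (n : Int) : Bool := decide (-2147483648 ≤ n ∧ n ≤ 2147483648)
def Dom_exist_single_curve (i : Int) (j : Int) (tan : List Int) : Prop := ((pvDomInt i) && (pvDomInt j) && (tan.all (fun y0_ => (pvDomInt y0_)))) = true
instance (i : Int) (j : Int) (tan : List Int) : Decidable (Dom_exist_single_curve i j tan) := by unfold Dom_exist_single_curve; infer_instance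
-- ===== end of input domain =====

-- ===== PORT A =====
-- B fuses A's two short-circuit scans into one pass tracking both flags; return values proved equal.
-- A: two `all` scans over range(i, j); tan[k] via Python indexing (pyGetD exact inside Pre_).
def exist_single_curve (i : Int) (j : Int) (tan : List Int) : Bool :=
  let is_increasing := (PySem.List.pyRange i j 1).all
    (fun k => decide (PySem.List.pyGetD tan k 0 ≤ PySem.List.pyGetD tan (k + 1) 0))
  if is_increasing then true
  else
    let is_decreasing := (PySem.List.pyRange i j 1).all
      (fun k => decide (PySem.List.pyGetD tan k 0 ≥ PySem.List.pyGetD tan (k + 1) 0))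
    if is_decreasing then true else false

-- ===== PORT B =====
-- B's loop: one pass with flags inc, dec, early break when both cleared.
def escAltLoop (tan : List Int) : List Int → Bool → Bool → Bool
  | [], inc, dec => inc || dec
  | k :: ks, inc, dec =>
      let a := PySem.List.pyGetD tan k 0
      let b := PySem.List.pyGetD tan (k + 1) 0
      let inc' := if a > b then false else inc
      let dec' := if a < b then false else dec
      if !(inc' || dec') then false else escAltLoop tan ks inc' dec'

def exist_single_curve_alt (i : Int) (j : Int) (tan : List Int) : Bool :=
  escAltLoop tan (PySem.List.pyRange i j 1) true true

-- ===== PRECONDITION & SPEC =====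
-- Pre_ excludes ranges that touch an out-of-range index of tan, where the Python A usually
-- raises IndexError (on rare such inputs a short-circuit lets A return False before the bad
-- index; B returns the same False there, see the cite).
def Pre_exist_single_curve (i : Int) (j : Int) (tan : List Int) : Prop :=
  j ≤ i ∨ (-(tan.length : Int) ≤ i ∧ j ≤ (tan.length : Int) - 1)
instance (i : Int) (j : Int) (tan : List Int) : Decidable (Pre_exist_single_curve i j tan) := by
  unfold Pre_exist_single_curve; infer_instance
def pvWitness_exist_single_curve : Int × Int × List Int := (0, 2, [1, 2, 2])

def Spec_exist_single_curve (i : Int) (j : Int) (tan : List Int) (out : Bool) : Prop := out = exist_single_curve_alt i j tan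
instance (i : Int) (j : Int) (tan : List Int) (out : Bool) : Decidable (Spec_exist_single_curve i j tan out) := by unfold Spec_exist_single_curve; infer_instance

-- ===== CLAIM =====
def Claim_equal_exist_single_curve : Prop := ∀ (i : Int) (j : Int) (tan : List Int), Dom_exist_single_curve i j tan → Pre_exist_single_curve i j tan → Spec_exist_single_curve i j tan (exist_single_curve i j tan)

-- ===== LEMMAS AND PROOFS =====
theorem escAltLoop_eq (tan : List Int) (ks : List Int) :
    ∀ inc dec : Bool, escAltLoop tan ks inc dec =
      ((inc && ks.all (fun k => decide (PySem.List.pyGetD tan k 0 ≤ PySem.List.pyGetD tan (k + 1) 0)))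
       || (dec && ks.all (fun k => decide (PySem.List.pyGetD tan k 0 ≥ PySem.List.pyGetD tan (k + 1) 0)))) := by
  induction ks with
  | nil => intro inc dec; cases inc <;> cases dec <;> simp [escAltLoop]
  | cons k ks ih =>
      intro inc dec
      simp only [escAltLoop, List.all_cons]
      generalize PySem.List.pyGetD tan k 0 = a
      generalize PySem.List.pyGetD tan (k + 1) 0 = b
      rcases lt_trichotomy a b with h | h | h
      · cases inc <;> cases dec <;>
          simp [ih, h, h.le, asymm h, not_le.mpr h]
      · subst h
        cases inc <;> cases dec <;> simp [ih]
      · cases inc <;> cases dec <;>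
          simp [ih, h, h.le, asymm h, not_le.mpr h]

-- ===== VERDICT =====
theorem exist_single_curve_spec : Claim_equal_exist_single_curve := by
  intro i j tan _ _
  unfold Spec_exist_single_curve exist_single_curve exist_single_curve_alt
  rw [escAltLoop_eq]
  set f := fun k => decide (PySem.List.pyGetD tan k 0 ≤ PySem.List.pyGetD tan (k + 1) 0)
  set g := fun k => decide (PySem.List.pyGetD tan k 0 ≥ PySem.List.pyGetD tan (k + 1) 0)
  cases h1 : (PySem.List.pyRange i j 1).all f <;> cases h2 : (PySem.List.pyRange i j 1).all g <;> simp
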